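-- pv_equiv track=rewrite | github.com/Mehdilk12/mehdi | pythonProject1/process_cards.py | three_digit1
-- ===== SOURCE A (Python) =====
-- def three_digit1(card):
--     result = []
--     values = {'K': 0, 'Q': 0, 'J': 0, 'A': 1}
--     for char in card:
--         if char.isdigit():
--             result.append(char)
--         elif char in values:
--             result.append(str(values[char]))
--     return ''.join(result)
-- ===== SOURCE B (Python) =====
-- def three_digit1(card):
--     # transform-then-filter: normalise face cards in one sweep, then keep digits
--     table = str.maketrans('KQJA', '0001')
--     mapped = card.translate(table)
--     return ''.join(ch for ch in mapped if ch.isdigit())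
-- ===== Notes on version B (the rewrite author's own statement) =====
-- stated objective: idiomatic
-- what changed: A's single fused filter-and-map loop with a dict lookup and per-char list appends becomes a two-pass transform-then-filter: translate K/Q/J/A to their digit characters via str.translate, then keep only digit characters.
import Mathlib
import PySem

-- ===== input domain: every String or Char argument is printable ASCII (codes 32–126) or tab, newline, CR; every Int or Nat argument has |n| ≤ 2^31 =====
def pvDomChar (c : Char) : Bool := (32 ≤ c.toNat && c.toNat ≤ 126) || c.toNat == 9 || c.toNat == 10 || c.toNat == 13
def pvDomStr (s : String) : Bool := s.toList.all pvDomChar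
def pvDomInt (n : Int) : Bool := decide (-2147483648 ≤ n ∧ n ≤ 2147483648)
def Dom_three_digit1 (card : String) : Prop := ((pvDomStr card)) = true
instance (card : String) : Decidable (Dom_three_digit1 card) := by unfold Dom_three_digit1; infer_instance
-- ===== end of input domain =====

-- B replaces A's fused filter-and-map loop by an idiomatic transform-then-filter two-pass decomposition.

-- ===== PORT A =====
def three_digit1 (card : String) : String :=
  let values : PySem.Dict String Int :=
    (((PySem.Dict.empty.insert "K" 0).insert "Q" 0).insert "J" 0).insert "A" 1
  let result : List String :=
    card.toList.foldl (fun r c =>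
      if PySem.Chars.isdigit c then r ++ [String.ofList [c]]
      else if values.contains (String.ofList [c]) then
        r ++ [PySem.Int.toStr ((values.get? (String.ofList [c])).getD 0)]
      else r) []
  PySem.Str.join "" result

-- ===== PORT B =====
-- the translation table KQJA -> 0001 (str.maketrans('KQJA','0001'))
def pvTr (c : Char) : Char :=
  if c = 'K' then '0' else if c = 'Q' then '0' else if c = 'J' then '0'
  else if c = 'A' then '1' else c

def three_digit1_alt (card : String) : String :=
  let mapped : List Char := card.toList.map pvTr
  String.ofList (mapped.filter PySem.Chars.isdigit)

-- ===== PRECONDITION & SPEC =====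
def Spec_three_digit1 (card : String) (out : String) : Prop := out = three_digit1_alt card
instance (card : String) (out : String) : Decidable (Spec_three_digit1 card out) := by unfold Spec_three_digit1; infer_instance

-- ===== CLAIM (what is proved, stated in full; the proofs are below) =====
def Claim_equal_three_digit1 : Prop := ∀ (card : String), Dom_three_digit1 card → Spec_three_digit1 card (three_digit1 card)

-- ===== LEMMAS AND PROOFS =====

-- per-character contribution of A's loop body
def pvG (c : Char) : List String :=
  if PySem.Chars.isdigit c then [String.ofList [c]]
  else if c = 'K' ∨ c = 'Q' ∨ c = 'J' then [PySem.Int.toStr 0]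
  else if c = 'A' then [PySem.Int.toStr 1]
  else []

lemma pvA_body (r : List String) (c : Char) :
    (if PySem.Chars.isdigit c then r ++ [String.ofList [c]]
     else if ((((PySem.Dict.empty.insert "K" (0:Int)).insert "Q" 0).insert "J" 0).insert "A" 1).contains (String.ofList [c]) then
       r ++ [PySem.Int.toStr ((((((PySem.Dict.empty.insert "K" (0:Int)).insert "Q" 0).insert "J" 0).insert "A" 1).get? (String.ofList [c])).getD 0)]
     else r) = r ++ pvG c := by
  unfold pvG
  by_cases hd : PySem.Chars.isdigit c
  · simp [hd]
  · have hone : ∀ k : Char, (String.ofList [c] = String.ofList [k]) ↔ c = k := by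
      intro k
      constructor
      · intro h
        have := congrArg String.toList h
        simp only [String.toList_ofList] at this
        exact List.singleton_injective this
      · intro h; rw [h]
    by_cases hK : c = 'K'
    · subst hK
      have h1 : ((((PySem.Dict.empty.insert "K" (0:Int)).insert "Q" 0).insert "J" 0).insert "A" 1).contains (String.ofList ['K']) = true := by decide
      have h2 : ((((PySem.Dict.empty.insert "K" (0:Int)).insert "Q" 0).insert "J" 0).insert "A" 1).get? (String.ofList ['K']) = some 0 := by decide
      simp [hd, h1, h2]
    · by_cases hQ : c = 'Q'
      · subst hQ
        have h1 : ((((PySem.Dict.empty.insert "K" (0:Int)).insert "Q" 0).insert "J" 0).insert "A" 1).contains (String.ofList ['Q']) = true := by decide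
        have h2 : ((((PySem.Dict.empty.insert "K" (0:Int)).insert "Q" 0).insert "J" 0).insert "A" 1).get? (String.ofList ['Q']) = some 0 := by decide
        simp [hd, h1, h2]
      · by_cases hJ : c = 'J'
        · subst hJ
          have h1 : ((((PySem.Dict.empty.insert "K" (0:Int)).insert "Q" 0).insert "J" 0).insert "A" 1).contains (String.ofList ['J']) = true := by decide
          have h2 : ((((PySem.Dict.empty.insert "K" (0:Int)).insert "Q" 0).insert "J" 0).insert "A" 1).get? (String.ofList ['J']) = some 0 := by decide
          simp [hd, h1, h2]
        · by_cases hA : c = 'A'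
          · subst hA
            have h1 : ((((PySem.Dict.empty.insert "K" (0:Int)).insert "Q" 0).insert "J" 0).insert "A" 1).contains (String.ofList ['A']) = true := by decide
            have h2 : ((((PySem.Dict.empty.insert "K" (0:Int)).insert "Q" 0).insert "J" 0).insert "A" 1).get? (String.ofList ['A']) = some 1 := by decide
            simp [hd, h1, h2]
          · have h1 : ((((PySem.Dict.empty.insert "K" (0:Int)).insert "Q" 0).insert "J" 0).insert "A" 1).contains (String.ofList [c]) = false := by
              simp [PySem.Dict.contains, PySem.Dict.insert, PySem.Dict.empty,
                beq_eq_false_iff_ne]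
              refine ⟨?_, ?_, ?_, ?_⟩ <;>
                · intro h
                  first
                  | exact hK ((hone _).mp h.symm)
                  | exact hQ ((hone _).mp h.symm)
                  | exact hJ ((hone _).mp h.symm)
                  | exact hA ((hone _).mp h.symm)
            simp [hd, h1, hK, hQ, hJ, hA]

lemma pvA_foldl (cs : List Char) (init : List String) :
    cs.foldl (fun r c =>
      if PySem.Chars.isdigit c then r ++ [String.ofList [c]]
      else if ((((PySem.Dict.empty.insert "K" (0:Int)).insert "Q" 0).insert "J" 0).insert "A" 1).contains (String.ofList [c]) then
        r ++ [PySem.Int.toStr ((((((PySem.Dict.empty.insert "K" (0:Int)).insert "Q" 0).insert "J" 0).insert "A" 1).get? (String.ofList [c])).getD 0)]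
      else r) init = init ++ cs.flatMap pvG := by
  induction cs generalizing init with
  | nil => simp
  | cons c cs ih =>
    rw [List.foldl_cons, pvA_body, ih, List.flatMap_cons, List.append_assoc]

-- per-character agreement with B, on the level of character lists
lemma pvG_char (c : Char) :
    (pvG c).map String.toList =
      (if PySem.Chars.isdigit (pvTr c) then [pvTr c] else []).map (fun d => [d]) := by
  unfold pvG pvTr
  by_cases hK : c = 'K'
  · subst hK; decide
  · by_cases hQ : c = 'Q'
    · subst hQ; decide
    · by_cases hJ : c = 'J'
      · subst hJ; decide
      · by_cases hA : c = 'A'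
        · subst hA; decide
        · simp only [hK, hQ, hJ, hA, if_false, or_self]
          by_cases hd : PySem.Chars.isdigit c <;> simp [hd]

lemma pvFlat (cs : List Char) :
    (cs.flatMap pvG).map String.toList =
      ((cs.map pvTr).filter PySem.Chars.isdigit).map (fun d => [d]) := by
  induction cs with
  | nil => simp
  | cons c cs ih =>
    rw [List.flatMap_cons, List.map_append, pvG_char c, ih, List.map_cons,
      List.filter_cons]
    by_cases hd : PySem.Chars.isdigit (pvTr c) <;> simp [hd]

-- ===== VERDICT (by name: the statement is the Claim_ definition above) =====
theorem three_digit1_spec : Claim_equal_three_digit1 := by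
  intro card _
  show three_digit1 card = three_digit1_alt card
  have hA : three_digit1 card =
      PySem.Str.join "" (card.toList.flatMap pvG) := by
    show PySem.Str.join "" (card.toList.foldl (fun r c =>
      if PySem.Chars.isdigit c then r ++ [String.ofList [c]]
      else if ((((PySem.Dict.empty.insert "K" (0:Int)).insert "Q" 0).insert "J" 0).insert "A" 1).contains (String.ofList [c]) then
        r ++ [PySem.Int.toStr ((((((PySem.Dict.empty.insert "K" (0:Int)).insert "Q" 0).insert "J" 0).insert "A" 1).get? (String.ofList [c])).getD 0)]
      else r) []) = _
    rw [pvA_foldl, List.nil_append]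
  rw [hA]
  apply String.toList_inj.mp
  show _ = (String.ofList ((card.toList.map pvTr).filter PySem.Chars.isdigit)).toList
  simp only [PySem.Str.toList_join, String.toList_empty, String.toList_ofList]
  rw [pvFlat]
  exact PySem.Chars.join_nil_singletons _
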